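-- pv_equiv track=rewrite | github.com/muneebaifrah/Unstop-100-Days-Coding-Sprint | Day-38/2.Max_Split.py | best_split_index
-- ===== SOURCE A (Python) =====
-- def best_split_index(N, S):
--     if N == 0:  # edge case
--         return -1
--
--     # Step 1: left distinct counts
--     left = [0] * N
--     seen_left = [False] * 10
--     count = 0
--     for i, ch in enumerate(S):
--         d = int(ch)
--         if not seen_left[d]:
--             seen_left[d] = True
--             count += 1
--         left[i] = count
--
--     # Step 2: right distinct counts
--     right = [0] * N
--     seen_right = [False] * 10
--     count = 0
--     for i in range(N-1, -1, -1):
--         d = int(S[i])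
--         if not seen_right[d]:
--             seen_right[d] = True
--             count += 1
--         right[i] = count
--
--     # Step 3: find best split
--     best_score = -1
--     best_index = 0
--     for i in range(N-1):  # split at i, right part starts at i+1
--         score = left[i] + right[i+1]
--         if score > best_score:
--             best_score = score
--             best_index = i
--
--     return best_index
-- ===== SOURCE B (Python) =====
-- def best_split_index(N, S):
--     # Brute force over all splits: score each split directly with a set of the
--     # digit values on each side, take the first maximum via max(..., key=...).
--     if N == 0:
--         return -1
--     if N == 1:
--         return 0
--     return max(range(N - 1),
--                key=lambda i: len(set(map(int, S[:i+1]))) + len(set(map(int, S[i+1:]))))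
-- ===== Notes on version B (the rewrite author's own statement) =====
-- stated objective: simpler
-- what changed: Replaces A's three loops (prefix distinct-count array, suffix distinct-count array, running-best scan) by a one-line brute force: max(range(N-1), key=...) scoring each split directly with a set of the digit values of each slice.
-- outside the precondition, e.g. on best_split_index(-2, ''): A returns 0, B raises ValueError
import Mathlib
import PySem

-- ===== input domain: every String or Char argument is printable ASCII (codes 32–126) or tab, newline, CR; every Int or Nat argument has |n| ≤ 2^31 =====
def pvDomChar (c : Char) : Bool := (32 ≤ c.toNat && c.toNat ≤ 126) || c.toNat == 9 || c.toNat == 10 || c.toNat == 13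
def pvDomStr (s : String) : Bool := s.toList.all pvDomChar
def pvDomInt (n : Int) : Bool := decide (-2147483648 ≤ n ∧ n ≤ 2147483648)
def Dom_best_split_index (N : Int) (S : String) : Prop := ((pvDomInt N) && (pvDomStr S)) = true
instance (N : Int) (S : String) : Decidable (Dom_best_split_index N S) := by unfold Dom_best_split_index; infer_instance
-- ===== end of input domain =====

-- B replaces A's two counting passes and running-best loop by a brute-force scan:
-- score every split directly with a set of the digit values of each slice, first max wins.

-- shared helper: int(ch) for a single character (both Pythons call int on one char)
def pvDigit (c : Char) : Int := (PySem.Int.ofChars? [c]).getD 0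

-- ===== PORT A =====
def pvInit : List Bool × Int := (List.replicate 10 false, 0)
def pvStep (p : List Bool × Int) (c : Char) : List Bool × Int :=
  if p.1.getD (pvDigit c).toNat false then p else (p.1.set (pvDigit c).toNat true, p.2 + 1)

-- A's step 1: left[i] = distinct-digit count of S[0..i]
def pvLeftPass (S : String) : List Int :=
  (S.toList.foldl
    (fun (st : (List Bool × Int) × List Int) ch =>
      let p := pvStep st.1 ch
      (p, st.2 ++ [p.2]))
    (pvInit, [])).2

-- A's step 2: right[i] = distinct-digit count of S[i..], built backwards
def pvRightPass (N : Int) (S : String) : List Int :=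
  ((PySem.List.pyRange (N-1) (-1) (-1)).foldl
    (fun (st : (List Bool × Int) × List Int) i =>
      let p := pvStep st.1 ((PySem.Str.pyGet? S i).getD ' ')
      (p, p.2 :: st.2))
    (pvInit, [])).2

def best_split_index (N : Int) (S : String) : Int :=
  if N = 0 then -1
  else
    ((PySem.List.pyRange 0 (N-1) 1).foldl
      (fun (st : Int × Int) i =>
        let score := (pvLeftPass S).getD i.toNat 0 + (pvRightPass N S).getD (i+1).toNat 0
        if st.1 < score then (score, i) else st)
      (-1, 0)).2

-- ===== PORT B =====
def best_split_index_alt (N : Int) (S : String) : Int :=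
  if N = 0 then -1
  else if N = 1 then 0
  else
    -- max(range(N-1), key=lambda i: len(set(map(int, S[:i+1]))) + len(set(map(int, S[i+1:]))))
    -- (the range is nonempty on Pre_, so Python's max never raises; getD 0 only totalises)
    (PySem.List.max? (PySem.List.pyRange 0 (N-1) 1)
      (fun i =>
        ((PySem.Set.ofList ((PySem.Str.slice S none (some (i+1))).toList.map pvDigit)).length : Int)
        + ((PySem.Set.ofList ((PySem.Str.slice S (some (i+1)) none).toList.map pvDigit)).length : Int))).getD 0

-- ===== PRECONDITION & SPEC =====
-- Pre_ excludes the inputs where A raises (len(S) ≠ N with N > 0: IndexError; a non-digit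
-- character reached by int(): ValueError) and the accidental corner N < 0 with S = "", where
-- A happens to return 0 from empty loops while B's max() over an empty range raises ValueError.
def Pre_best_split_index (N : Int) (S : String) : Prop :=
  N = 0 ∨ (N = (S.toList.length : Int) ∧ ∀ c ∈ S.toList, c.isDigit)
instance (N : Int) (S : String) : Decidable (Pre_best_split_index N S) := by
  unfold Pre_best_split_index; infer_instance
def pvWitness_best_split_index : Int × String := (0, "")

def Spec_best_split_index (N : Int) (S : String) (out : Int) : Prop := out = best_split_index_alt N S
instance (N : Int) (S : String) (out : Int) : Decidable (Spec_best_split_index N S out) := by unfold Spec_best_split_index; infer_instance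

-- ===== CLAIM (what is proved, stated in full; the proofs are below) =====
def Claim_equal_best_split_index : Prop := ∀ (N : Int) (S : String), Dom_best_split_index N S → Pre_best_split_index N S → Spec_best_split_index N S (best_split_index N S)

-- ===== LEMMAS AND PROOFS =====

theorem char_eq_of_toNat {c c' : Char} (h : c.toNat = c'.toNat) : c = c' :=
  Char.ext (UInt32.toNat_inj.mp h)

theorem pvDigit_val (c : Char) (h : c.isDigit = true) :
    PySem.Int.ofChars? [c] = some ((c.toNat : Int) - 48) := by
  have hb : 48 ≤ c.toNat ∧ c.toNat ≤ 57 := by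
    simp [Char.isDigit] at h
    exact ⟨h.1, h.2⟩
  obtain ⟨h1, h2⟩ := hb
  interval_cases hk : c.toNat <;>
    first
      | (rw [char_eq_of_toNat (c := c) (c' := '0') (by rw [hk]; decide)]; decide)
      | (rw [char_eq_of_toNat (c := c) (c' := '1') (by rw [hk]; decide)]; decide)
      | (rw [char_eq_of_toNat (c := c) (c' := '2') (by rw [hk]; decide)]; decide)
      | (rw [char_eq_of_toNat (c := c) (c' := '3') (by rw [hk]; decide)]; decide)
      | (rw [char_eq_of_toNat (c := c) (c' := '4') (by rw [hk]; decide)]; decide)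
      | (rw [char_eq_of_toNat (c := c) (c' := '5') (by rw [hk]; decide)]; decide)
      | (rw [char_eq_of_toNat (c := c) (c' := '6') (by rw [hk]; decide)]; decide)
      | (rw [char_eq_of_toNat (c := c) (c' := '7') (by rw [hk]; decide)]; decide)
      | (rw [char_eq_of_toNat (c := c) (c' := '8') (by rw [hk]; decide)]; decide)
      | (rw [char_eq_of_toNat (c := c) (c' := '9') (by rw [hk]; decide)]; decide)

theorem pvDigit_bounds (c : Char) (h : c.isDigit = true) :
    (pvDigit c).toNat < 10 ∧ (pvDigit c).toNat = c.toNat - 48 := by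
  have hb : 48 ≤ c.toNat ∧ c.toNat ≤ 57 := by
    simp [Char.isDigit] at h
    exact ⟨h.1, h.2⟩
  rw [pvDigit, pvDigit_val c h]
  simp only [Option.getD_some]
  omega

theorem pvDigit_inj {c c' : Char} (hc : c.isDigit = true) (hc' : c'.isDigit = true)
    (h : (pvDigit c).toNat = (pvDigit c').toNat) : c = c' := by
  have h1 := pvDigit_bounds c hc
  have h2 := pvDigit_bounds c' hc'
  have hb : 48 ≤ c.toNat := by
    simp [Char.isDigit] at hc
    exact hc.1
  have hb' : 48 ≤ c'.toNat := by
    simp [Char.isDigit] at hc'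
    exact hc'.1
  exact char_eq_of_toNat (by omega)

-- distinct count, as B computes it
def pvD (l : List Char) : Int := ((PySem.Set.ofList l).length : Int)

theorem pvSet_ofList_append (l : List Char) (c : Char) :
    PySem.Set.ofList (l ++ [c]) =
      if c ∈ l then PySem.Set.ofList l else PySem.Set.ofList l ++ [c] := by
  rw [PySem.Set.ofList_eq_foldl, List.foldl_append, ← PySem.Set.ofList_eq_foldl]
  simp only [List.foldl_cons, List.foldl_nil, PySem.Set.add]
  by_cases hc : c ∈ l
  · simp [PySem.Set.mem_ofList, hc]
  · simp [PySem.Set.mem_ofList, hc]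

theorem pvD_append (l : List Char) (c : Char) :
    pvD (l ++ [c]) = if c ∈ l then pvD l else pvD l + 1 := by
  unfold pvD
  rw [pvSet_ofList_append]
  split <;> simp

theorem pvSetLen_eq_card {α : Type} [DecidableEq α] (l : List α) :
    (PySem.Set.ofList l).length = l.toFinset.card := by
  rw [← List.toFinset_card_of_nodup (PySem.Set.nodup_ofList l)]
  congr 1
  ext x
  simp [PySem.Set.mem_ofList]

theorem pvD_eq_card (l : List Char) : pvD l = (l.toFinset.card : Int) := by
  unfold pvD
  rw [pvSetLen_eq_card]

theorem pvD_reverse (l : List Char) : pvD l.reverse = pvD l := by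
  rw [pvD_eq_card, pvD_eq_card, List.toFinset_reverse]

-- running seen/count state
def pvLS (cs : List Char) : List Bool × Int := cs.foldl pvStep pvInit

theorem pvLS_append (cs : List Char) (c : Char) : pvLS (cs ++ [c]) = pvStep (pvLS cs) c := by
  simp [pvLS, List.foldl_append]

-- the invariant of A's seen-array loop: count = |set(prefix)|, seen[d] ⟺ d occurred
theorem pvLS_spec (l : List Char) (hl : ∀ c ∈ l, c.isDigit = true) :
    (pvLS l).1.length = 10 ∧ (pvLS l).2 = pvD l ∧
      ∀ c, c.isDigit = true → (((pvLS l).1.getD (pvDigit c).toNat false = true) ↔ c ∈ l) := by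
  induction l using List.reverseRecOn with
  | nil =>
      refine ⟨by simp [pvLS, pvInit], by simp [pvLS, pvInit, pvD, PySem.Set.ofList], ?_⟩
      intro c hc
      have hidx := pvDigit_bounds c hc
      show (pvLS []).1.getD (pvDigit c).toNat false = true ↔ c ∈ []
      have h1 : pvLS [] = pvInit := rfl
      rw [h1]
      show (List.replicate 10 false).getD (pvDigit c).toNat false = true ↔ c ∈ ([] : List Char)
      rw [List.getD_replicate false hidx.1]
      simp
  | append_singleton l c ih =>
      have hc : c.isDigit = true := hl c (by simp)
      have hl' : ∀ c' ∈ l, c'.isDigit = true := fun c' h => hl c' (by simp [h])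
      obtain ⟨hlen, hcount, hseen⟩ := ih hl'
      have hidx := pvDigit_bounds c hc
      rw [pvLS_append]
      unfold pvStep
      by_cases hmem : c ∈ l
      · rw [if_pos ((hseen c hc).mpr hmem)]
        refine ⟨hlen, by rw [hcount, pvD_append, if_pos hmem], ?_⟩
        intro c' hc'
        rw [hseen c' hc']
        constructor
        · intro h; exact List.mem_append_left _ h
        · intro h
          rcases List.mem_append.mp h with h | h
          · exact h
          · simp at h; subst h; exact hmem
      · rw [if_neg (by rw [hseen c hc]; exact hmem)]
        refine ⟨by simpa using hlen, ?_, ?_⟩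
        · simp only [hcount, pvD_append, if_neg hmem]
        · intro c' hc'
          by_cases heq : (pvDigit c').toNat = (pvDigit c).toNat
          · have : c' = c := pvDigit_inj hc' hc heq
            subst this
            rw [heq]
            simp only [List.getD]
            rw [List.getElem?_set_self (by omega)]
            simp
          · simp only [List.getD]
            rw [List.getElem?_set_ne (fun h => heq h.symm)]
            rw [← List.getD, hseen c' hc']
            constructor
            · intro h; exact List.mem_append_left _ h
            · intro h
              rcases List.mem_append.mp h with h | h
              · exact h
              · exfalso; simp at h; subst h; exact heq rfl

-- left pass characterisation (A builds left[] by appending the running count)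
def pvLL (cs : List Char) : List Int :=
  (List.range cs.length).map (fun i => (pvLS (cs.take (i+1))).2)

theorem pvLL_append (cs : List Char) (c : Char) :
    pvLL (cs ++ [c]) = pvLL cs ++ [(pvLS (cs ++ [c])).2] := by
  simp only [pvLL, List.length_append, List.length_singleton, List.range_succ, List.map_append,
    List.map_cons, List.map_nil]
  congr 1
  · apply List.map_congr_left
    intro i hi
    simp only [List.mem_range] at hi
    rw [List.take_append_of_le_length (by omega)]
  · rw [List.take_of_length_le (by simp)]

theorem pvLeftPass_eq (S : String) :
    pvLeftPass S = pvLL S.toList := by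
  unfold pvLeftPass
  suffices h : ∀ cs : List Char,
      cs.foldl (fun (st : (List Bool × Int) × List Int) ch =>
        let p := pvStep st.1 ch
        (p, st.2 ++ [p.2])) (pvInit, []) = (pvLS cs, pvLL cs) by
    rw [h]
  intro cs
  induction cs using List.reverseRecOn with
  | nil => simp [pvLS, pvLL, pvInit]
  | append_singleton cs c ih =>
      rw [List.foldl_append, ih]
      simp only [List.foldl_cons, List.foldl_nil]
      rw [pvLL_append, pvLS_append]

theorem pvLL_getD (cs : List Char) (i : Nat) (hi : i < cs.length)
    (hdig : ∀ c ∈ cs, c.isDigit = true) :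
    (pvLL cs).getD i 0 = pvD (cs.take (i+1)) := by
  have : (pvLL cs).getD i 0 = (pvLS (cs.take (i+1))).2 := by
    simp [pvLL, List.getD, hi]
  rw [this]
  exact (pvLS_spec (cs.take (i+1)) (fun c hc => hdig c (List.mem_of_mem_take hc))).2.1

-- right pass: the index loop over range(N-1,-1,-1) is the char loop over reverse(S)
theorem pvRight_toCharFold (S : String) (m : Nat) (hm : m ≤ S.toList.length) :
    ∀ init : (List Bool × Int) × List Int,
    (PySem.List.pyRange ((m : Int) - 1) (-1) (-1)).foldl
      (fun (st : (List Bool × Int) × List Int) i =>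
        let p := pvStep st.1 ((PySem.Str.pyGet? S i).getD ' ')
        (p, p.2 :: st.2)) init
    = ((S.toList.take m).reverse).foldl
      (fun (st : (List Bool × Int) × List Int) ch =>
        let p := pvStep st.1 ch
        (p, p.2 :: st.2)) init := by
  induction m with
  | zero => intro init; rw [PySem.List.pyRange_neg_one_eq_nil (by norm_num)]; simp
  | succ m ih =>
      intro init
      have hm' : m ≤ S.toList.length := by omega
      have hcast : ((m + 1 : Nat) : Int) - 1 = (m : Int) := by push_cast; ring
      rw [hcast, PySem.List.pyRange_neg_one_cons (by omega)]
      have htk : (S.toList.take (m+1)).reverse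
          = S.toList[m] :: (S.toList.take m).reverse := by
        rw [List.take_add_one, List.reverse_append,
          List.getElem?_eq_getElem (show m < S.toList.length by omega)]
        rfl
      rw [htk]
      simp only [List.foldl_cons]
      have hchar : (PySem.Str.pyGet? S (m : Int)).getD ' ' = S.toList[m] := by
        rw [PySem.Str.pyGet?_natCast,
          List.getElem?_eq_getElem (show m < S.toList.length by omega)]
        rfl
      rw [hchar, ih hm']

-- the char loop over any list yields the reversed list of prefix counts
theorem pvCharFold_spec (l : List Char) :
    l.foldl (fun (st : (List Bool × Int) × List Int) ch =>
        let p := pvStep st.1 ch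
        (p, p.2 :: st.2)) (pvInit, [])
    = (pvLS l, ((List.range l.length).map (fun k => (pvLS (l.take (k+1))).2)).reverse) := by
  induction l using List.reverseRecOn with
  | nil => simp [pvLS, pvInit]
  | append_singleton l c ih =>
      rw [List.foldl_append, ih]
      simp only [List.foldl_cons, List.foldl_nil]
      rw [← pvLS_append]
      congr 1
      simp only [List.length_append, List.length_singleton, List.range_succ, List.map_append,
        List.map_cons, List.map_nil, List.reverse_append]
      simp only [List.take_of_length_le (show (l ++ [c]).length ≤ l.length + 1 by simp)]
      congr 2
      apply List.map_congr_left
      intro i hi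
      simp only [List.mem_range] at hi
      rw [List.take_append_of_le_length (by omega)]

-- A's right[] array: entry j is the distinct count of the suffix S[j:]
theorem pvCharFold_snd (l : List Char) :
    (l.foldl (fun (st : (List Bool × Int) × List Int) ch =>
        let p := pvStep st.1 ch
        (p, p.2 :: st.2)) (pvInit, [])).2
    = ((List.range l.length).map (fun k => (pvLS (l.take (k+1))).2)).reverse := by
  rw [pvCharFold_spec]

theorem pvRightPass_getD (S : String) (j : Nat) (hj : j < S.toList.length)
    (hdig : ∀ c ∈ S.toList, c.isDigit = true) :
    (pvRightPass ((S.toList.length : Int)) S).getD j 0 = pvD (S.toList.drop j) := by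
  unfold pvRightPass
  rw [pvRight_toCharFold S S.toList.length le_rfl, List.take_of_length_le le_rfl,
    pvCharFold_snd, List.length_reverse]
  have hget : (((List.range S.toList.length).map
        (fun k => (pvLS (S.toList.reverse.take (k+1))).2)).reverse).getD j 0
      = (pvLS (S.toList.reverse.take (S.toList.length - 1 - j + 1))).2 := by
    rw [List.getD, List.getElem?_eq_getElem (by simpa using hj)]
    simp only [Option.getD_some]
    rw [List.getElem_reverse, List.getElem_map, List.getElem_range]
    congr 2
    simp
  rw [hget]
  have htake : S.toList.reverse.take (S.toList.length - 1 - j + 1)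
      = (S.toList.drop j).reverse := by
    apply List.reverse_injective
    rw [List.reverse_reverse, List.reverse_take, List.reverse_reverse, List.length_reverse]
    congr 1
    omega
  rw [htake]
  have hd : ∀ c ∈ (S.toList.drop j).reverse, c.isDigit = true := by
    intro c hc
    exact hdig c (List.mem_of_mem_drop (List.mem_reverse.mp hc))
  rw [(pvLS_spec _ hd).2.1, pvD_reverse]

theorem pvDigit_val_inj {c c' : Char} (hc : c.isDigit = true) (hc' : c'.isDigit = true)
    (h : pvDigit c = pvDigit c') : c = c' := by
  unfold pvDigit at h
  rw [pvDigit_val c hc, pvDigit_val c' hc'] at h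
  simp only [Option.getD_some] at h
  exact char_eq_of_toNat (by omega)

theorem pvD_map_digit (l : List Char) (h : ∀ c ∈ l, c.isDigit = true) :
    ((PySem.Set.ofList (l.map pvDigit)).length : Int) = pvD l := by
  rw [pvD_eq_card, pvSetLen_eq_card,
    show (l.map pvDigit).toFinset = l.toFinset.image pvDigit by ext x; simp]
  rw [Finset.card_image_of_injOn]
  intro a ha b hb hab
  exact pvDigit_val_inj (h a (List.mem_toFinset.mp ha)) (h b (List.mem_toFinset.mp hb)) hab

-- the common per-split score
def pvK (cs : List Char) (i : Int) : Int := pvD (cs.take (i+1).toNat) + pvD (cs.drop (i+1).toNat)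

-- B's max(..., key) key equals pvK
theorem pvAltKey_eq (S : String) (i : Int) (hi : 0 ≤ i)
    (hdig : ∀ c ∈ S.toList, c.isDigit = true) :
    ((PySem.Set.ofList ((PySem.Str.slice S none (some (i+1))).toList.map pvDigit)).length : Int)
      + ((PySem.Set.ofList ((PySem.Str.slice S (some (i+1)) none).toList.map pvDigit)).length : Int)
    = pvK S.toList i := by
  unfold pvK
  rw [PySem.Str.toList_slice, PySem.Str.toList_slice, PySem.Chars.slice_eq_listSlice,
    PySem.Chars.slice_eq_listSlice, PySem.List.slice_to S.toList (b := i+1) (by omega),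
    PySem.List.slice_from S.toList (a := i+1) (by omega),
    pvD_map_digit _ (fun c hc => hdig c (List.mem_of_mem_take hc)),
    pvD_map_digit _ (fun c hc => hdig c (List.mem_of_mem_drop hc))]

-- first-argmax: A's running-best fold equals Python's max(xs, key) (first extremal)
theorem pvArgmax_aux (K : Int → Int) (t : List Int) :
    ∀ b : Int, t.foldl (fun (st : Int × Int) i => if st.1 < K i then (K i, i) else st) (K b, b)
      = (K (t.foldl (fun m y => if K m < K y then y else m) b),
         t.foldl (fun m y => if K m < K y then y else m) b) := by
  induction t with
  | nil => intro b; simp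
  | cons y t ih =>
      intro b
      simp only [List.foldl_cons]
      by_cases h : K b < K y
      · rw [if_pos h, if_pos h, ih]
      · rw [if_neg h, if_neg h, ih]

theorem pvMax?_cons (K : Int → Int) (t : List Int) : ∀ x : Int,
    PySem.List.max? (x :: t) K = some (t.foldl (fun m y => if K m < K y then y else m) x) := by
  induction t with
  | nil => intro x; rfl
  | cons y t ih =>
      intro x
      have h1 : PySem.List.max? (x :: y :: t) K
          = PySem.List.max? ((if K x < K y then y else x) :: t) K := by
        unfold PySem.List.max?
        simp only [List.foldl_cons]
        split <;> rfl
      rw [h1, ih]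
      simp only [List.foldl_cons]

theorem pvMax?_congr_aux (K1 K2 : Int → Int) (t : List Int) :
    ∀ x : Int, (∀ y ∈ t, K1 y = K2 y) → K1 x = K2 x →
      t.foldl (fun m y => if K1 m < K1 y then y else m) x
        = t.foldl (fun m y => if K2 m < K2 y then y else m) x := by
  induction t with
  | nil => intro x _ _; rfl
  | cons y t ih =>
      intro x h hx
      have hy : K1 y = K2 y := h y (by simp)
      simp only [List.foldl_cons]
      have hcond : (K1 x < K1 y) = (K2 x < K2 y) := by rw [hx, hy]
      by_cases hlt : K1 x < K1 y
      · rw [if_pos hlt, if_pos (by rw [← hcond]; exact hlt)]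
        exact ih y (fun z hz => h z (by simp [hz])) hy
      · rw [if_neg hlt, if_neg (by rw [← hcond]; exact hlt)]
        exact ih x (fun z hz => h z (by simp [hz])) hx

theorem pvMax?_congr (K1 K2 : Int → Int) (xs : List Int)
    (h : ∀ x ∈ xs, K1 x = K2 x) :
    PySem.List.max? xs K1 = PySem.List.max? xs K2 := by
  cases xs with
  | nil => rfl
  | cons x t =>
      rw [pvMax?_cons, pvMax?_cons]
      rw [pvMax?_congr_aux K1 K2 t x (fun y hy => h y (by simp [hy])) (h x (by simp))]

theorem pvArgmax_eq_max? (K : Int → Int) (x : Int) (t : List Int) (hx : 0 ≤ K x) :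
    ((x :: t).foldl (fun (st : Int × Int) i => if st.1 < K i then (K i, i) else st) (-1, 0)).2
      = (PySem.List.max? (x :: t) K).getD 0 := by
  rw [pvMax?_cons]
  simp only [List.foldl_cons]
  rw [if_pos (show (-1 : Int) < K x by omega), pvArgmax_aux]
  rfl

-- ===== VERDICT (by name: the statement is the Claim_ definition above) =====
theorem best_split_index_spec : Claim_equal_best_split_index := by
  intro N S _ hpre
  unfold Spec_best_split_index best_split_index best_split_index_alt
  rcases hpre with h0 | ⟨hlen, hdig⟩
  · simp [h0]
  · by_cases h0 : N = 0
    · simp [h0]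
    · rw [if_neg h0, if_neg h0]
      have hn1 : 1 ≤ S.toList.length := by
        rcases Nat.eq_zero_or_pos S.toList.length with h | h
        · exfalso; exact h0 (by omega)
        · omega
      by_cases h1 : N = 1
      · rw [if_pos h1, h1]
        rw [PySem.List.pyRange_one_eq_nil (by norm_num)]
        rfl
      · rw [if_neg h1]
        have hn2 : 2 ≤ S.toList.length := by omega
        have hdigL : ∀ c ∈ S.toList, c.isDigit = true := fun c hc => hdig c hc
        have hAkey : ∀ (st : Int × Int), ∀ i ∈ PySem.List.pyRange 0 (N-1) 1,
            (fun (st : Int × Int) i =>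
              let score := (pvLeftPass S).getD i.toNat 0 + (pvRightPass N S).getD (i+1).toNat 0
              if st.1 < score then (score, i) else st) st i
            = (fun (st : Int × Int) i => if st.1 < pvK S.toList i then (pvK S.toList i, i) else st) st i := by
          intro st i hi
          rw [PySem.List.mem_pyRange_one] at hi
          obtain ⟨hi0, hiN⟩ := hi
          have hscore : (pvLeftPass S).getD i.toNat 0 + (pvRightPass N S).getD (i+1).toNat 0
              = pvK S.toList i := by
            rw [hlen, pvLeftPass_eq, pvLL_getD S.toList i.toNat (by omega) hdigL]
            have h2 : (i+1).toNat = i.toNat + 1 := by omega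
            rw [h2, pvRightPass_getD S (i.toNat + 1) (by omega) hdigL]
            unfold pvK
            rw [h2]
          simp only [hscore]
        rw [PySem.List.foldl_congr_mem _ _
          (fun (st : Int × Int) i => if st.1 < pvK S.toList i then (pvK S.toList i, i) else st)
          _ hAkey]
        have hmax : PySem.List.max? (PySem.List.pyRange 0 (N-1) 1)
            (fun i =>
              ((PySem.Set.ofList ((PySem.Str.slice S none (some (i+1))).toList.map pvDigit)).length : Int)
              + ((PySem.Set.ofList ((PySem.Str.slice S (some (i+1)) none).toList.map pvDigit)).length : Int))
            = PySem.List.max? (PySem.List.pyRange 0 (N-1) 1) (pvK S.toList) := by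
          apply pvMax?_congr
          intro i hi
          rw [PySem.List.mem_pyRange_one] at hi
          exact pvAltKey_eq S i hi.1 hdigL
        rw [hmax]
        have hcons : PySem.List.pyRange 0 (N-1) 1 = 0 :: PySem.List.pyRange 1 (N-1) 1 :=
          PySem.List.pyRange_one_cons (by omega)
        rw [hcons]
        apply pvArgmax_eq_max?
        unfold pvK pvD
        omega
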